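-- pv_equiv track=rewrite | github.com/con-jo-ry/citation_task | validate.py | _split_into_prompts
-- ===== SOURCE A (Python) =====
-- from typing import List, Dict, Set, Tuple
--
-- def _split_into_prompts(content: str) -> List[Tuple[str, int]]:
--     """Split content into prompts separated by --- at line start."""
--     lines = content.split('\n')
--     prompts = []
--     current_prompt = []
--     start_line = 1
--
--     for line_num, line in enumerate(lines, 1):
--         if line.strip() == '---':
--             if current_prompt:
--                 prompts.append(('\n'.join(current_prompt), start_line))
--             current_prompt = []
--             start_line = line_num + 1
--         else:
--             current_prompt.append(line)
--
--     # Add the last prompt if it exists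
--     if current_prompt:
--         prompts.append(('\n'.join(current_prompt), start_line))
--
--     return prompts
-- ===== SOURCE B (Python) =====
-- def _split_into_prompts(content):
--     """Split content into prompts separated by --- at line start.
--
--     Index-based partition: skip separator lines, then grab each maximal
--     run of non-separator lines at once; start_line = run's first index + 1.
--     """
--     lines = content.split('\n')
--     n = len(lines)
--     prompts = []
--     i = 0
--     while i < n:
--         if lines[i].strip() == '---':
--             i += 1
--             continue
--         j = i + 1
--         while j < n and lines[j].strip() != '---':
--             j += 1
--         prompts.append(('\n'.join(lines[i:j]), i + 1))
--         i = j
--     return prompts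
-- ===== Notes on version B (the rewrite author's own statement) =====
-- stated objective: alternative
-- what changed: Replaced the stateful accumulator/flush loop (current_prompt list, start_line variable, trailing flush) with an index-based partition scan that skips separator lines and grabs each maximal run of non-separator lines at once, deriving start_line from the run's first index.
import Mathlib
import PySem

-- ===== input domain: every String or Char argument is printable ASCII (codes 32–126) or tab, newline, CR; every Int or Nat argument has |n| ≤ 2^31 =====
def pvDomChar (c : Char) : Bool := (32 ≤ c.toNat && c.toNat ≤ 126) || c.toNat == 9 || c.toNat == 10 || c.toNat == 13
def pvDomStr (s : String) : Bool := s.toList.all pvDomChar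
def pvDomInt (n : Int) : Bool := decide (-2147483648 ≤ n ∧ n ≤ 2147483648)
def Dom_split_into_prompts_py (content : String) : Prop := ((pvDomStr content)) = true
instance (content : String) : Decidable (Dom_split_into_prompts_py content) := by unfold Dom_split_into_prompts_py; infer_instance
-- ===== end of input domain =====

-- B is an alternative, structurally different formulation: it partitions the line list into
-- maximal non-separator runs instead of A's accumulator/flush loop; same O(n) cost.

-- ===== PORT A =====
-- content.split('\n'): exact — the separator "\n" is a nonempty literal, so Python's split never raises
-- (PySem.Chars.splitOn is the sep ≠ "" form of str.split).
def pvLines (content : String) : List String :=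
  (PySem.Chars.splitOn content.toList "\n".toList).map String.ofList

-- A's for-loop over enumerate(lines, 1) with state (prompts, current_prompt, start_line);
-- the [] case is the trailing flush after the loop.
def pvALoop : List (Int × String) → List (String × Int) → List String → Int → List (String × Int)
  | [], prompts, current, start =>
      if current ≠ [] then prompts ++ [(PySem.Str.join "\n" current, start)] else prompts
  | (n, l) :: rest, prompts, current, start =>
      if PySem.Str.strip l == "---" then
        pvALoop rest
          (if current ≠ [] then prompts ++ [(PySem.Str.join "\n" current, start)] else prompts)
          [] (n + 1)
      else
        pvALoop rest prompts (current ++ [l]) start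

def split_into_prompts_py (content : String) : List (String × Int) :=
  pvALoop (PySem.List.enumerate (pvLines content) 1) [] [] 1

-- ===== PORT B =====
-- Source B's outer while over the remaining suffix (0-based position i): a separator line is
-- skipped; otherwise the inner while's scan to j is the run l :: takeWhile, emitted at once.
def pvBLoop : List String → Int → List (String × Int)
  | [], _ => []
  | l :: rest, i =>
      if PySem.Str.strip l == "---" then
        pvBLoop rest (i + 1)
      else
        let grp := rest.takeWhile (fun x => !(PySem.Str.strip x == "---"))
        (PySem.Str.join "\n" (l :: grp), i + 1)
          :: pvBLoop (rest.dropWhile (fun x => !(PySem.Str.strip x == "---"))) (i + 1 + grp.length)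
  termination_by ls _ => ls.length
  decreasing_by
    · simp
    · simpa using Nat.lt_succ_of_le (List.length_dropWhile_le _ _)

def split_into_prompts_py_alt (content : String) : List (String × Int) :=
  pvBLoop (pvLines content) 0

-- ===== PRECONDITION & SPEC =====
def Spec_split_into_prompts_py (content : String) (out : List (String × Int)) : Prop := out = split_into_prompts_py_alt content
instance (content : String) (out : List (String × Int)) : Decidable (Spec_split_into_prompts_py content out) := by unfold Spec_split_into_prompts_py; infer_instance

-- ===== CLAIM (what is proved, stated in full; the proofs are below) =====
def Claim_equal_split_into_prompts_py : Prop := ∀ (content : String), Dom_split_into_prompts_py content → Spec_split_into_prompts_py content (split_into_prompts_py content)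

-- ===== LEMMAS AND PROOFS =====

-- Joint loop invariant, by one structural induction on the line list:
--  (1) from the "fresh" state (current = [], start = i+1) A's loop produces prompts ++ B's run list;
--  (2) mid-run (current ≠ []) A's loop flushes current ++ the rest of the run at `start`,
--      then continues like B after the run.
theorem pvAB (ls : List String) :
    (∀ (i : Int) (prompts : List (String × Int)),
        pvALoop (PySem.List.enumerate ls (i + 1)) prompts [] (i + 1)
          = prompts ++ pvBLoop ls i)
    ∧ (∀ (i start : Int) (prompts : List (String × Int)) (cur : List String), cur ≠ [] →
        pvALoop (PySem.List.enumerate ls (i + 1)) prompts cur start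
          = prompts
            ++ (PySem.Str.join "\n" (cur ++ ls.takeWhile (fun x => !(PySem.Str.strip x == "---"))), start)
            :: pvBLoop (ls.dropWhile (fun x => !(PySem.Str.strip x == "---")))
                 (i + (ls.takeWhile (fun x => !(PySem.Str.strip x == "---"))).length)) := by
  induction ls with
  | nil =>
      constructor
      · intro i prompts; simp [PySem.List.enumerate_nil, pvALoop, pvBLoop]
      · intro i start prompts cur hcur
        simp [PySem.List.enumerate_nil, pvALoop, pvBLoop, hcur]
  | cons l rest ih =>
      obtain ⟨ihA, ihB⟩ := ih
      constructor
      · intro i prompts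
        by_cases hsep : PySem.Str.strip l == "---"
        · rw [PySem.List.enumerate_cons]
          have h1 : pvALoop ((i + 1, l) :: PySem.List.enumerate rest (i + 1 + 1)) prompts [] (i + 1)
              = pvALoop (PySem.List.enumerate rest (i + 1 + 1)) prompts [] (i + 1 + 1) := by
            simp [pvALoop, hsep]
          rw [h1]
          have := ihA (i + 1) prompts
          rw [show i + 1 + 1 = (i + 1) + 1 by ring] at *
          rw [this]
          simp [pvBLoop, hsep]
        · rw [PySem.List.enumerate_cons]
          have h1 : pvALoop ((i + 1, l) :: PySem.List.enumerate rest (i + 1 + 1)) prompts [] (i + 1)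
              = pvALoop (PySem.List.enumerate rest ((i + 1) + 1)) prompts [l] (i + 1) := by
            simp [pvALoop, hsep]
          rw [h1, ihB (i + 1) (i + 1) prompts [l] (by simp)]
          simp [pvBLoop, hsep]
      · intro i start prompts cur hcur
        by_cases hsep : PySem.Str.strip l == "---"
        · rw [PySem.List.enumerate_cons]
          have h1 : pvALoop ((i + 1, l) :: PySem.List.enumerate rest (i + 1 + 1)) prompts cur start
              = pvALoop (PySem.List.enumerate rest ((i + 1) + 1))
                  (prompts ++ [(PySem.Str.join "\n" cur, start)]) [] ((i + 1) + 1) := by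
            simp [pvALoop, hsep, hcur]
          rw [h1, ihA (i + 1) (prompts ++ [(PySem.Str.join "\n" cur, start)])]
          simp [pvBLoop, hsep]
        · rw [PySem.List.enumerate_cons]
          have h1 : pvALoop ((i + 1, l) :: PySem.List.enumerate rest (i + 1 + 1)) prompts cur start
              = pvALoop (PySem.List.enumerate rest ((i + 1) + 1)) prompts (cur ++ [l]) start := by
            simp [pvALoop, hsep]
          rw [h1, ihB (i + 1) start prompts (cur ++ [l]) (by simp)]
          simp [hsep]
          ring_nf

-- ===== VERDICT (by name: the statement is the Claim_ definition above) =====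
theorem split_into_prompts_py_spec : Claim_equal_split_into_prompts_py := by
  intro content _
  unfold Spec_split_into_prompts_py split_into_prompts_py split_into_prompts_py_alt
  have := (pvAB (pvLines content)).1 0 []
  simpa using this
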